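/- GENERATED by mk_final_copies.py from the proof of the farm's unit `start_decoder.C13c` (farm:start_decoder.C13c.1: Lemmas.lean) as the
   re-elaboration sweep compiled it — do not edit. -/
/-
  Lemmas of the unit `start_decoder.C13c` (0x114f78 … 0x114fe3): the carry of the inner loop's invariant `In13K` over a stretch that
  writes quiet windows (`C13.QuietWin13`) AND bytes of the `multiplicands` block (the round's one store `multiplicands[j·D + k] = val`),
  modelled on `C14.carry14`; and the three kinds of check site of the stretch.
-/
import Asan.CheckWalk
import Vorbis.Spec.StartDecoderATest
import Vorbis.Spec.StartDecoderCarry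
import Vorbis.Spec.StartDecoderC13
import Vorbis.Spec.StartDecoderC14
import Vorbis.Spec.Units.start_decoder_C13c

open X86 X86.User Asan Vorbis Vorbis.Spec Vorbis.Spec.StartDecoder

set_option maxRecDepth 100000
set_option maxHeartbeats 4000000

namespace Vorbis.Spec.start_decoder_C13c

/-- **A check site inside the struct `cb(i)`** (`k` bytes at `c + off`, `c = codebooks + 2120·i`): inside the codebooks block
(`CodebooksOK` over the function's block predicate: `SDw.cb0`), which is live (`Env.live`). -/
theorem c13c_site {g : Ghost} {i : Nat} {A2 A3 Ai : Arena} {A : Arena × List Obj} {v : State}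
    (hc : Cur g i A2 A3 Ai A v) (off k : Nat) (h1 : 1 ≤ k) (h2 : off + k ≤ 2120) :
    Site (Live (stackObjs g.frames' ++ A.2)) (g.cb v.mem i + off) k := by
  rcases (hc.sd.cb0 (by omega)).1 with h0 | hok
  · exact absurd h0 (hc.sd.cb0 (by omega)).2
  · exact hok.site_cb_field hc.sd.env.live i hc.lt off k h2 h1 rfl

/-- **The check site of `mults[off]`** (0x114f78): 2 bytes at `mults + 2·off`, `off < LV`, inside the temp block
`TBlock(mults, 2·LV)` (`Mults.temps`), which is live (`ArenaOK.site_tblock`). -/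
theorem c13c_site_mults {u₀ : State} {g : Ghost} {i : Nat} {A2 A3 Ai Am : Arena} {A : Arena × List Obj} {mults : Nat} {n d : Int}
    {j kk : Nat} {pc : Word} {v : State} (h : In13K u₀ g i A2 A3 Ai Am A mults n d j kk pc v) {off : Nat}
    (hoff : off < Codebook.lookup_values v.mem (g.cb v.mem i)) :
    Site (Live (stackObjs g.frames' ++ A.2)) (mults + 2 * off) 2 := by
  have ha : ArenaOK A.1 A.2 v.mem g.f := h.cur.sd.arena
  have ht : A.1.TBlock mults (2 * Codebook.lookup_values v.mem (g.cb v.mem i)) :=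
    h.mults.temps.tblock List.mem_cons_self
  exact ha.site_tblock (fun o ho => List.mem_append_right _ ho) ht (by omega) (by omega) (by decide)

/-- **The check site of `multiplicands[x]`** (0x114fd3): 4 bytes at `mu + 4·x`, `x < N·D`, inside the setup block
`Block(mu, 4·N·D)` (`In13K.mu`), which is live (`ArenaOK.site_block`). -/
theorem c13c_site_mu {u₀ : State} {g : Ghost} {i : Nat} {A2 A3 Ai Am : Arena} {A : Arena × List Obj} {mults : Nat} {n d : Int}
    {j kk : Nat} {pc : Word} {v : State} (h : In13K u₀ g i A2 A3 Ai Am A mults n d j kk pc v) {x : Nat}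
    (hx : x < (Codebook.N v.mem (g.cb v.mem i)).toNat * (Codebook.dimensions v.mem (g.cb v.mem i)).toNat) :
    Site (Live (stackObjs g.frames' ++ A.2)) (Codebook.multiplicands v.mem (g.cb v.mem i) + 4 * x) 4 := by
  have ha : ArenaOK A.1 A.2 v.mem g.f := h.cur.sd.arena
  have hb : A.1.Block (Codebook.multiplicands v.mem (g.cb v.mem i))
      (4 * ((Codebook.N v.mem (g.cb v.mem i)).toNat * (Codebook.dimensions v.mem (g.cb v.mem i)).toNat)) := h.mu.1
  exact ha.site_block (fun o ho => List.mem_append_right _ ho) hb (by omega) (by omega) (by decide)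

/-- **The element index of the store** (`ebp = r13d·r12d + r15d = D·j + k`): below `N·D` (`j < N`, `k < D`), hence `≤ 1FFFFFFFH`:
no 32-bit wrap in `imul ; add ; movsxd`. -/
theorem c13c_index {N D : Int} {j kk : Nat} (hj : (j : Int) < N) (hk : (kk : Int) < D) (hp : N * D ≤ 0x1FFFFFFF) :
    D.toNat * j + kk < N.toNat * D.toNat ∧ N.toNat * D.toNat ≤ 0x1FFFFFFF := by
  have hN : 0 ≤ N := by omega
  have hD : 0 ≤ D := by omega
  obtain ⟨N', rfl⟩ := Int.eq_ofNat_of_zero_le hN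
  obtain ⟨D', rfl⟩ := Int.eq_ofNat_of_zero_le hD
  simp only [Int.toNat_natCast]
  have hj' : j + 1 ≤ N' := by omega
  have hk' : kk < D' := by omega
  have hp' : N' * D' ≤ 0x1FFFFFFF := by
    have : ((N' * D' : Nat) : Int) ≤ 0x1FFFFFFF := by
      rw [Int.natCast_mul]
      exact hp
    omega
  refine ⟨?_, hp'⟩
  have h1 : D' * (j + 1) ≤ D' * N' := Nat.mul_le_mul_left _ hj'
  rw [Nat.mul_comm N' D']
  rw [Nat.mul_add, Nat.mul_one] at h1
  omega

/-- **The address of the stored element** as the walker spells it (`mov ebp, r13d ; imul ebp, r12d ; add ebp, r15d ; movsxd rbp, ebp ;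
shl rbp, 2 ; add rbp, [r14+20H]`): `mu + 4·(D·j + k)` when the index is below `2^31` (no 32-bit wrap, no sign). -/
theorem c13c_elem (D j kk mu : Nat) (h : D * j + kk < 2 ^ 31) :
    Word.ofBV (BitVec.signExtend 64
      (Word.part Width.w32 (addr D) * Word.part Width.w32 (addr j) + Word.part Width.w32 (addr kk))) <<< 2 +
        UInt64.ofNat mu = addr (mu + 4 * (D * j + kk)) := by
  unfold addr
  rw [cnt32_part, cnt32_part, cnt32_part, ← BitVec.ofNat_mul, ← BitVec.ofNat_add]
  apply UInt64.toNat_inj.mp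
  rw [UInt64.toNat_add, cnt32_sext_bv_shl2 (D * j + kk) h, UInt64.toNat_ofNat', UInt64.toNat_ofNat']
  omega

/-- **A window a step of `C13c` may write**: a quiet window of the inner loop (`C13.QuietWin13`: the stack below `R`, the float
locals, `z`) or bytes of the `multiplicands` block of the book under construction. -/
def MuWin (g : Ghost) (i : Nat) (m : Mem) (w : Span) : Prop :=
  C13.QuietWin13 g w ∨
    (Codebook.multiplicands m (g.cb m i) ≤ w.lo ∧
      w.hi ≤ Codebook.multiplicands m (g.cb m i) +
        4 * ((Codebook.N m (g.cb m i)).toNat * (Codebook.dimensions m (g.cb m i)).toNat))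

set_option maxHeartbeats 2000000 in
/-- **THE CARRY OF THE INNER LOOP'S INVARIANT over the store into `multiplicands`** (`C13.carry13` + windows inside the block of
`multiplicands`; the proof is that of `C14.carry14`): `In13K` at the new state and program counter, same ghost arena and counters,
and `cb(i)` is the same address. The store keeps the record (`Young` window: `ArenaOK.old_disjoint_since`), the struct (off the
young block: `young_off_book`) and the `sorted_values` block (older than `Am`: `arena_disjoint` + `Since.ne_since`). -/
theorem c13c_carry {u₀ : State} {g : Ghost} {i : Nat} {A2 A3 Ai Am : Arena} {A : Arena × List Obj} {mults : Nat} {n d : Int}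
    {j kk : Nat} {pc pc' : Word} {v w : State} {ws : List Span}
    (h : In13K u₀ g i A2 A3 Ai Am A mults n d j kk pc v)
    (hs : Mem.SameExcept ws v.mem w.mem) (hun : ShadowUntouched v.mem w.mem)
    (hq : ∀ x, x ∈ ws → MuWin g i v.mem x)
    (hrip : w.rip = pc') (hrsp : w.reg .rsp = v.reg .rsp) (hcode : CodeOK u₀ w.mem) (hinv : abiInv w)
    (hr14 : w.reg .r14 = v.reg .r14) (hr12 : w.reg .r12 = v.reg .r12) (hr15 : w.reg .r15 = v.reg .r15)
    (hrbx : w.reg .rbx = v.reg .rbx) :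
    In13K u₀ g i A2 A3 Ai Am A mults n d j kk pc' w ∧ g.cb w.mem i = g.cb v.mem i := by
  have hfr := h.frame
  have hpos : Pos g A := Pos.of hfr h.cur
  have hm0 : MInv g i A2 A3 Ai A v.mem := MInv.of hfr h.cur
  have ha : ArenaOK A.1 A.2 v.mem g.f := h.cur.sd.arena
  have hcw := hm0.c_where
  have p1 := hpos.r_eq
  have p2 := hpos.ra_lo
  have p3 := hpos.ra_hi
  have p4 := hpos.ar_stack
  have p5 := hpos.objOut
  have p6 := hpos.ar_hi
  -- the block of `multiplicands`: young, inside the arena, off the struct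
  have hmu : Since Ai A.1 ⟨Codebook.multiplicands v.mem (g.cb v.mem i),
      4 * ((Codebook.N v.mem (g.cb v.mem i)).toNat * (Codebook.dimensions v.mem (g.cb v.mem i)).toNat)⟩ :=
    h.mu.older h.extm
  obtain ⟨hmin, hmoff⟩ := young_off_book hm0 hmu
  simp only [] at hmin hmoff
  have hmuS := h.mu
  have hq' : ∀ x, x ∈ ws → C13.QuietWin13 g x ∨
      (Codebook.multiplicands v.mem (g.cb v.mem i) ≤ x.lo ∧ x.hi ≤ Codebook.multiplicands v.mem (g.cb v.mem i) +
        4 * ((Codebook.N v.mem (g.cb v.mem i)).toNat * (Codebook.dimensions v.mem (g.cb v.mem i)).toNat)) := by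
    intro x hx
    have k := hq x hx
    unfold MuWin at k
    exact k
  generalize 4 * ((Codebook.N v.mem (g.cb v.mem i)).toNat * (Codebook.dimensions v.mem (g.cb v.mem i)).toNat) = sz
    at hmu hmin hmoff hq' hmuS
  have hok : ∀ x, x ∈ ws → OkWin g Ai A (g.cb v.mem i) x := by
    intro x hx
    rcases hq' x hx with k | k
    · left
      unfold C13.QuietWin13 at k
      unfold OkWin0
      omega
    · right
      refine ⟨by omega, by omega, ?_⟩
      intro B hB
      have hd := ha.old_disjoint_since h.cur.ages.exti hB hmu
      simp only [vblock] at hd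
      omega
  have hb : Bits (g.Blk A) g.len w.mem g.f := by
    apply bits_kept hpos hm0.sd.bits hs
    intro x hx
    rcases hq' x hx with k | k
    · unfold C13.QuietWin13 at k
      omega
    · right
      left
      omega
  have hF := Frame.step hfr h.cur hs hun hok hb hrip hrsp hcode hinv
  obtain ⟨hC, hcb⟩ := Cur.step hfr h.cur hs hun hok hb hr14
  -- the struct `cb(i)` and the `sorted_values` block
  have hstruct : (Codebook.block (g.cb v.mem i)).Kept v.mem w.mem := by
    apply Block.Kept.of_sameExcept hs
    · intro x hx
      simp only [vblock, voff]
      rcases hq' x hx with k | k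
      · unfold C13.QuietWin13 at k
        omega
      · omega
    · simp only [vblock, voff]
      omega
  have hsf := Codebook.SameFields.of_kept hstruct
  have hsv : 1 ≤ Codebook.sorted_entries v.mem (g.cb v.mem i) →
      (Codebook.svBlock v.mem (g.cb v.mem i)).Kept v.mem w.mem := by
    intro hse
    have hsvm : Since Ai Am (Codebook.svBlock v.mem (g.cb v.mem i)) := h.k.k4.sv hse
    generalize Codebook.svBlock v.mem (g.cb v.mem i) = SV at hsvm ⊢
    have hsvA : A.1.Blk SV := (hsvm.mono h.extm').1
    have hdis := arena_disjoint ha hsvA hmuS.1 (Since.ne_since hsvm hmuS)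
    have hin := arena_inside ha hsvA
    simp only [vblock] at hdis
    apply Block.Kept.of_sameExcept hs
    · intro x hx
      rcases hq' x hx with k | k
      · unfold C13.QuietWin13 at k
        omega
      · omega
    · omega
  have hk : K15 (Since Ai Am) w.mem (g.cb v.mem i) := h.k.frame hstruct hsv
  have eN : Codebook.N w.mem (g.cb v.mem i) = Codebook.N v.mem (g.cb v.mem i) := by
    unfold Codebook.N
    rw [hsf.sparse, hsf.entries, hsf.sorted_entries]
  -- the three stack slots the invariant reads
  have hst : Mem.EqOn (g.R + 0x28) (g.R + 0x30) v.mem w.mem := by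
    apply hs.eqOn
    intro x hx
    rcases hq' x hx with k | k
    · unfold C13.QuietWin13 at k
      omega
    · omega
  have hst44 : Mem.EqOn (g.R + 0x44) (g.R + 0x48) v.mem w.mem := by
    apply hs.eqOn
    intro x hx
    rcases hq' x hx with k | k
    · unfold C13.QuietWin13 at k
      omega
    · omega
  have hst4c : Mem.EqOn (g.R + 0x4c) (g.R + 0x50) v.mem w.mem := by
    apply hs.eqOn
    intro x hx
    rcases hq' x hx with k | k
    · unfold C13.QuietWin13 at k
      omega
    · omega
  have e28 := hst.u64 (g.R + 0x28) (Nat.le_refl _) (by omega) (by omega)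
  have e44 := hst44.i32 (g.R + 0x44) (Nat.le_refl _) (by omega) (by omega)
  have e4c := hst4c.u32 (g.R + 0x4c) (Nat.le_refl _) (by omega) (by omega)
  refine ⟨?_, hcb⟩
  exact
    { frame := hF
      cur := hC
      extm := h.extm
      extm' := h.extm'
      k := by rw [hcb]; exact hk
      type1 := by rw [hcb, hsf.lookup_type]; exact h.type1
      r12 := hr12.trans h.r12
      j_lt := by rw [hcb, eN]; exact h.j_lt
      slot_len := by rw [hcb, eN, e44]; exact h.slot_len
      prod_le := by rw [hcb, eN, hsf.dimensions]; exact h.prod_le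
      mu := by rw [hcb, eN, hsf.dimensions, hsf.multiplicands]; exact h.mu
      mults :=
        { slot := by rw [e28]; exact h.mults.slot
          temps := by rw [hcb, hsf.lookup_values]; exact h.mults.temps
          lv_pos := by rw [hcb, hsf.lookup_values]; exact h.mults.lv_pos
          lv_lt := by rw [hcb, hsf.lookup_values]; exact h.mults.lv_lt }
      r15 := hr15.trans h.r15
      k_le := by rw [hcb, hsf.dimensions]; exact h.k_le
      div := by
        obtain ⟨dv, e1, e2, e3⟩ := h.div
        exact ⟨dv, hrbx.trans e1, e2, e3⟩
      slot_sp := by rw [hcb, hsf.sparse, e4c]; exact h.slot_sp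
      n_eq := by rw [hcb, eN]; exact h.n_eq
      d_eq := by rw [hcb, hsf.dimensions]; exact h.d_eq }

end Vorbis.Spec.start_decoder_C13c
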